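-- pv_equiv track=rewrite | github.com/Vicfred/kyopro | atcoder/abc426D_pop_and_insert.py | try_with_char
-- ===== SOURCE A (Python) =====
-- r = {'0': '1', '1': '0'}
--
-- def solve_from_one_side(s, x, reversed=False):
--     ans = 0
--     anss = [0]
--     indices = range(len(s))
--     if reversed: indices = range(len(s)-1, -1, -1)
--     for i in indices:
--         if s[i] == x:
--             ans += 2
--         else:
--             ans += 1
--         anss.append(ans)
--     return anss
--
-- def calc_next(s, x):
--     c = [0]*len(s)
--     last = len(s)
--     for i in range(len(s)-1, -1, -1):
--         if s[i] == x:
--             last = i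
--         c[i] = last
--     return c
--
-- def try_with_char(s, x):
--     a = solve_from_one_side(s, x)
--     b = solve_from_one_side(s, x, reversed=True)
--     c = calc_next(s, r[x])
--     ans = a[len(s)]
--     for i in range(len(s)):
--         j = c[i]
--         ans = min(ans, a[i]+b[len(s)-j])
--     return ans
-- ===== SOURCE B (Python) =====
-- r = {'0': '1', '1': '0'}
--
-- def try_with_char(s, x):
--     # one forward pass over runs: pair each opposite position j with the start
--     # of its run (previous opposite index + 1); suffix costs come from one
--     # prefix-cost array instead of a reversed cost array and a next-index table
--     opp = r[x]
--     n = len(s)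
--     p = [0]
--     for ch in s:
--         p.append(p[-1] + (2 if ch == x else 1))
--     total = p[n]
--     ans = total
--     start = 0
--     for j, ch in enumerate(s):
--         if ch == opp:
--             ans = min(ans, p[start] + (total - p[j]))
--             start = j + 1
--     return min(ans, p[start])
-- ===== Notes on version B (the rewrite author's own statement) =====
-- stated objective: alternative
-- what changed: B replaces A's three auxiliary arrays (forward costs, reversed costs, next-opposite-index table) and its per-index scan by a single prefix-cost array and one forward pass over the opposite-character positions, pairing each with the start of its run.
import Mathlib
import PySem

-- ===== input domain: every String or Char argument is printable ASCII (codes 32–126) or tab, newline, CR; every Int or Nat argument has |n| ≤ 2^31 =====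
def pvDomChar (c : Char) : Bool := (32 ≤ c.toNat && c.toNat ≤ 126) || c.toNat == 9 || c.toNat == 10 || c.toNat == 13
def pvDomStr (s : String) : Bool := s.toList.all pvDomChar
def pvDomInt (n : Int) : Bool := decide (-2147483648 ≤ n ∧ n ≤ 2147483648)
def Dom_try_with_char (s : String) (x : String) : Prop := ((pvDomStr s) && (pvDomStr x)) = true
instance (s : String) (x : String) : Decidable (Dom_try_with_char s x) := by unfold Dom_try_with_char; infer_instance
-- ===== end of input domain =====

-- B replaces A's three auxiliary arrays and per-index scan by one prefix-cost array and
-- a single forward pass over the opposite-character positions (objective: alternative).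

-- ===== PORT A =====
-- the module-level dict r = {'0': '1', '1': '0'}
def pvRDict : PySem.Dict String String := PySem.Dict.ofList [("0", "1"), ("1", "0")]

-- the cumulative 'ans' values appended to anss by solve_from_one_side's loop
def pvScanA (x : String) : Int → List Char → List Int
  | _, [] => []
  | ans, c :: t =>
    let ans2 := ans + (if String.mk [c] = x then 2 else 1)
    ans2 :: pvScanA x ans2 t

-- solve_from_one_side(s, x, reversed): iterate the chars (reversed iterates them backwards)
def pvSolveSide (cs : List Char) (x : String) (rev : Bool) : List Int :=
  let seq := if rev then cs.reverse else cs
  0 :: pvScanA x 0 seq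

-- calc_next, transcribed as the right-to-left recursion it performs ('last' = head of the
-- already-computed tail, len(s) when that tail is empty)
def pvCalcNext (x : String) (n : Int) : List Char → Int → List Int
  | [], _ => []
  | c :: t, i =>
    let rest := pvCalcNext x n t (i + 1)
    (if String.mk [c] = x then i else rest.headD n) :: rest

def try_with_char (s : String) (x : String) : Int :=
  let cs := s.toList
  let n : Int := cs.length
  let a := pvSolveSide cs x false
  let b := pvSolveSide cs x true
  let rx := (pvRDict.get? x).getD ""      -- r[x]; Pre_ excludes the KeyError inputs
  let c := pvCalcNext rx n cs 0
  let ans0 := PySem.List.pyGetD a n 0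
  (a.zip c).foldl (fun ans p => min ans (p.1 + PySem.List.pyGetD b (n - p.2) 0)) ans0

-- ===== PORT B =====
def try_with_char_alt (s : String) (x : String) : Int :=
  let opp := (pvRDict.get? x).getD ""     -- r[x]; Pre_ excludes the KeyError inputs
  let cs := s.toList
  let n : Int := cs.length
  -- p = [0]; for ch in s: p.append(p[-1] + (2 if ch == x else 1))
  let p := cs.foldl
    (fun acc c => acc ++ [PySem.List.pyGetD acc (-1) 0 + (if String.mk [c] = x then 2 else 1)])
    [(0 : Int)]
  let total := PySem.List.pyGetD p n 0
  -- for j, ch in enumerate(s): if ch == opp: ans = min(ans, p[start] + (total - p[j])); start = j+1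
  let fin := (PySem.List.enumerate cs 0).foldl
    (fun (st : Int × Int) jc =>
      if String.mk [jc.2] = opp then
        (min st.1 (PySem.List.pyGetD p st.2 0 + (total - PySem.List.pyGetD p jc.1 0)), jc.1 + 1)
      else st)
    (total, 0)
  min fin.1 (PySem.List.pyGetD p fin.2 0)

-- ===== PRECONDITION & SPEC =====
-- Pre_ excludes exactly the inputs where r[x] raises KeyError in both A and B.
def Pre_try_with_char (s : String) (x : String) : Prop := x = "0" ∨ x = "1"
instance (s : String) (x : String) : Decidable (Pre_try_with_char s x) := by
  unfold Pre_try_with_char; infer_instance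

def pvWitness_try_with_char : String × String := ("0110", "0")

def Spec_try_with_char (s : String) (x : String) (out : Int) : Prop := out = try_with_char_alt s x
instance (s : String) (x : String) (out : Int) : Decidable (Spec_try_with_char s x out) := by
  unfold Spec_try_with_char; infer_instance

-- ===== CLAIM (what is proved, stated in full; the proofs are below) =====
def Claim_equal_try_with_char : Prop := ∀ (s : String) (x : String), Dom_try_with_char s x → Pre_try_with_char s x → Spec_try_with_char s x (try_with_char s x)

-- ===== LEMMAS AND PROOFS =====

-- weight of one character and cost of a list of characters
def pvW (x : String) (c : Char) : Int := if String.mk [c] = x then 2 else 1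
def pvSum (x : String) (l : List Char) : Int := (l.map (pvW x)).sum
-- prefix cost / suffix cost
def pvP (x : String) (cs : List Char) (k : Nat) : Int := pvSum x (cs.take k)
def pvS (x : String) (cs : List Char) (k : Nat) : Int := pvSum x (cs.drop k)
-- "is the opposite character"
def pvOpp (y : String) (c : Char) : Bool := decide (String.mk [c] = y)
-- index of the first opposite character at position ≥ k (cs.length if none)
def pvNxt (y : String) (cs : List Char) (k : Nat) : Nat := k + (cs.drop k).findIdx (pvOpp y)
-- 1 + index of the last opposite character at position < k (0 if none)
def pvLS (y : String) (cs : List Char) : Nat → Nat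
  | 0 => 0
  | k + 1 => if pvOpp y (cs.getD k ' ') then k + 1 else pvLS y cs k

theorem pvW_pos (x : String) (c : Char) : 0 < pvW x c := by
  unfold pvW; split <;> norm_num

theorem pvSum_append (x : String) (l1 l2 : List Char) :
    pvSum x (l1 ++ l2) = pvSum x l1 + pvSum x l2 := by
  simp [pvSum]

theorem pvSum_nonneg (x : String) (l : List Char) : 0 ≤ pvSum x l := by
  induction l with
  | nil => simp [pvSum]
  | cons c t ih =>
    have h1 := pvW_pos x c
    unfold pvSum at *
    simp only [List.map_cons, List.sum_cons]
    omega
theorem pvP_mono (x : String) (cs : List Char) {i j : Nat} (h : i ≤ j) :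
    pvP x cs i ≤ pvP x cs j := by
  have h1 : cs.take i = (cs.take j).take i := by rw [List.take_take, Nat.min_eq_left h]
  have h2 : cs.take j = (cs.take j).take i ++ (cs.take j).drop i := (List.take_append_drop _ _).symm
  unfold pvP
  rw [h2, pvSum_append, ← h1]
  have := pvSum_nonneg x ((cs.take j).drop i)
  omega
theorem pvP_add_pvS (x : String) (cs : List Char) (k : Nat) :
    pvP x cs cs.length = pvP x cs k + pvS x cs k := by
  unfold pvP pvS
  rw [List.take_length, ← pvSum_append, List.take_append_drop]
theorem pvS_length (x : String) (cs : List Char) : pvS x cs cs.length = 0 := by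
  simp [pvS, pvSum]

theorem pvNxt_le (y : String) (cs : List Char) {k : Nat} (h : k ≤ cs.length) :
    pvNxt y cs k ≤ cs.length := by
  have h1 : (cs.drop k).findIdx (pvOpp y) ≤ (cs.drop k).length := List.findIdx_le_length
  have h2 : (cs.drop k).length = cs.length - k := List.length_drop
  unfold pvNxt; omega
theorem le_pvNxt (y : String) (cs : List Char) (k : Nat) : k ≤ pvNxt y cs k := by
  exact Nat.le_add_right _ _
theorem pvNxt_opp (y : String) (cs : List Char) {k : Nat}
    (h : pvNxt y cs k < cs.length) : pvOpp y (cs.getD (pvNxt y cs k) ' ') = true := by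
  have hk : k ≤ cs.length := le_trans (le_pvNxt y cs k) (le_of_lt h)
  have hlen : (cs.drop k).length = cs.length - k := List.length_drop
  have hfi : (cs.drop k).findIdx (pvOpp y) < (cs.drop k).length := by
    unfold pvNxt at h; omega
  have h1 : pvOpp y ((cs.drop k)[(cs.drop k).findIdx (pvOpp y)]) = true :=
    List.findIdx_getElem (w := hfi)
  rw [List.getElem_drop] at h1
  unfold pvNxt
  rw [List.getD_eq_getElem cs ' ' (by omega)]
  convert h1 using 2
theorem pvNxt_not_opp (y : String) (cs : List Char) {k m : Nat}
    (h1 : k ≤ m) (h2 : m < pvNxt y cs k) (h3 : m < cs.length) :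
    pvOpp y (cs.getD m ' ') = false := by
  have hlen : (cs.drop k).length = cs.length - k := List.length_drop
  have hfi : m - k < (cs.drop k).findIdx (pvOpp y) := by unfold pvNxt at h2; omega
  have h4 : pvOpp y ((cs.drop k)[m - k]'(by
      have := List.findIdx_le_length (p := pvOpp y) (xs := cs.drop k); omega)) = false :=
    List.not_of_lt_findIdx hfi
  rw [List.getElem_drop] at h4
  simp only [Nat.add_sub_cancel' h1] at h4
  rw [List.getD_eq_getElem cs ' ' h3]
  exact h4
theorem pvNxt_eq_of (y : String) (cs : List Char) {k j : Nat}
    (hk : k ≤ j) (hj : j ≤ cs.length)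
    (hno : ∀ m, k ≤ m → m < j → pvOpp y (cs.getD m ' ') = false)
    (hopp : j = cs.length ∨ pvOpp y (cs.getD j ' ') = true) :
    pvNxt y cs k = j := by
  have hle : pvNxt y cs k ≤ cs.length := pvNxt_le y cs (le_trans hk hj)
  have hge : k ≤ pvNxt y cs k := le_pvNxt y cs k
  rcases Nat.lt_trichotomy (pvNxt y cs k) j with h | h | h
  · exfalso
    have hlt : pvNxt y cs k < cs.length := lt_of_lt_of_le h hj
    have := pvNxt_opp y cs hlt
    rw [hno _ hge h] at this
    simp at this
  · exact h
  · exfalso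
    rcases hopp with rfl | hopp
    · omega
    · have hjlen : j < cs.length := by omega
      have := pvNxt_not_opp y cs hk h hjlen
      rw [hopp] at this
      simp at this

theorem pvLS_le (y : String) (cs : List Char) (k : Nat) : pvLS y cs k ≤ k := by
  induction k with
  | zero => simp [pvLS]
  | succ k ih =>
    unfold pvLS
    split
    · exact le_refl _
    · omega
theorem pvLS_no_opp (y : String) (cs : List Char) {k m : Nat}
    (h1 : pvLS y cs k ≤ m) (h2 : m < k) : pvOpp y (cs.getD m ' ') = false := by
  induction k with
  | zero => omega
  | succ k ih =>
    by_cases hc : pvOpp y (cs.getD k ' ') = true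
    · unfold pvLS at h1; rw [if_pos hc] at h1; omega
    · rcases Nat.lt_or_ge m k with hm | hm
      · unfold pvLS at h1; rw [if_neg hc] at h1; exact ih h1 hm
      · have hmk : m = k := by omega
        subst hmk
        simpa using hc
theorem pvLS_le_of (y : String) (cs : List Char) {k i : Nat}
    (h : ∀ m, m < k → pvOpp y (cs.getD m ' ') = true → m < i) : pvLS y cs k ≤ i := by
  induction k with
  | zero => simp [pvLS]
  | succ k ih =>
    unfold pvLS
    split
    · rename_i htrue
      have := h k (by omega) htrue
      omega
    · exact ih (fun m hm => h m (by omega))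

-- fold-min helpers
theorem fmin_le_init (a : Int) (l : List Int) : l.foldl min a ≤ a := by
  induction l generalizing a with
  | nil => simp
  | cons b t ih => exact le_trans (ih (min a b)) (min_le_left _ _)
theorem fmin_le_mem {b : Int} {l : List Int} (a : Int) (h : b ∈ l) : l.foldl min a ≤ b := by
  induction l generalizing a with
  | nil => simp at h
  | cons c t ih =>
    simp only [List.foldl_cons]
    rcases List.mem_cons.mp h with rfl | h
    · exact le_trans (fmin_le_init (min a b) t) (min_le_right _ _)
    · exact ih _ h
theorem le_fmin {c a : Int} {l : List Int} (h1 : c ≤ a) (h2 : ∀ b ∈ l, c ≤ b) :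
    c ≤ l.foldl min a := by
  induction l generalizing a with
  | nil => simpa
  | cons b t ih =>
    simp only [List.foldl_cons]
    exact ih (le_min h1 (h2 b List.mem_cons_self)) (fun d hd => h2 d (List.mem_cons_of_mem _ hd))

-- characterizations of the lists the ports build
theorem pvSum_reverse (x : String) (l : List Char) : pvSum x l.reverse = pvSum x l := by
  simp [pvSum, List.map_reverse]

theorem pvScanA_eq (x : String) : ∀ (cs : List Char) (a0 : Int),
    pvScanA x a0 cs = (List.range cs.length).map (fun k => a0 + pvSum x (cs.take (k + 1))) := by
  intro cs
  induction cs with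
  | nil => intro a0; simp [pvScanA]
  | cons c t ih =>
    intro a0
    simp only [pvScanA]
    rw [ih]
    simp only [List.length_cons, List.range_succ_eq_map, List.map_cons, List.map_map]
    congr 1
    · simp [pvSum, pvW]
    · apply List.map_congr_left
      intro k _
      simp only [Function.comp_apply, Nat.succ_eq_add_one, List.take_succ_cons, pvSum, pvW,
        List.map_cons, List.sum_cons]
      ring

theorem pvAList (x : String) (cs : List Char) :
    (0 : Int) :: pvScanA x 0 cs = (List.range (cs.length + 1)).map (pvP x cs) := by
  rw [pvScanA_eq, List.range_succ_eq_map, List.map_cons, List.map_map]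
  refine List.cons_eq_cons.mpr ⟨by simp [pvP, pvSum], ?_⟩
  apply List.map_congr_left
  intro k _
  simp [Function.comp, pvP]
theorem pvSolveSide_false (cs : List Char) (x : String) :
    pvSolveSide cs x false = (List.range (cs.length + 1)).map (pvP x cs) := by
  unfold pvSolveSide
  simpa using pvAList x cs
theorem pvSolveSide_true (cs : List Char) (x : String) :
    pvSolveSide cs x true =
      (List.range (cs.length + 1)).map (fun k => pvS x cs (cs.length - k)) := by
  unfold pvSolveSide
  have h := pvAList x cs.reverse
  rw [List.length_reverse] at h
  simp only [if_pos]
  rw [h]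
  apply List.map_congr_left
  intro k _
  unfold pvP pvS
  rw [List.take_reverse, pvSum_reverse]
theorem pvCalcNext_gen (y : String) (n : Int) : ∀ (t : List Char) (i0 : Int),
    pvCalcNext y n t i0 =
      (List.range t.length).map (fun k =>
        if (t.drop k).any (pvOpp y) then i0 + k + ((t.drop k).findIdx (pvOpp y) : Int) else n) := by
  intro t
  induction t with
  | nil => intro i0; simp [pvCalcNext]
  | cons c t ih =>
    intro i0
    simp only [pvCalcNext]
    rw [ih]
    simp only [List.length_cons, List.range_succ_eq_map, List.map_cons, List.map_map]
    congr 1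
    · -- head element, k = 0
      by_cases hc : pvOpp y c = true
      · have hc' : String.mk [c] = y := by simpa [pvOpp] using hc
        simp [hc', List.any_cons, hc, List.findIdx_cons]
      · have hc' : ¬ String.mk [c] = y := by simpa [pvOpp] using hc
        have hb : pvOpp y c = false := by simpa using hc
        rw [if_neg hc']
        cases t with
        | nil => simp [hb]
        | cons c' t' =>
          rw [show (c' :: t').length = t'.length + 1 from rfl, List.range_succ_eq_map,
            List.map_cons, List.headD_cons]
          simp only [List.drop_zero, List.any_cons, hb, Bool.false_or, List.findIdx_cons,
            cond_false, Nat.cast_zero]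
          split
          · push_cast; ring
          · rfl
    · apply List.map_congr_left
      intro k _
      simp only [Function.comp_apply, Nat.succ_eq_add_one, List.drop_succ_cons]
      split
      · push_cast; ring_nf
      · rfl

theorem pvCalcNext_eq (y : String) (cs : List Char) :
    pvCalcNext y (cs.length : Int) cs 0 =
      (List.range cs.length).map (fun k => (pvNxt y cs k : Int)) := by
  rw [pvCalcNext_gen]
  apply List.map_congr_left
  intro k hk
  rw [List.mem_range] at hk
  unfold pvNxt
  split
  · push_cast; ring
  · rename_i hany
    have hall : ∀ ch ∈ cs.drop k, pvOpp y ch = false := by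
      intro ch hch
      by_contra hcontra
      exact hany (List.any_eq_true.mpr ⟨ch, hch, by simpa using hcontra⟩)
    have : (cs.drop k).findIdx (pvOpp y) = (cs.drop k).length := List.findIdx_eq_length.mpr hall
    rw [this, List.length_drop]
    omega
theorem pvBList (x : String) (cs : List Char) :
    cs.foldl
      (fun acc c => acc ++ [PySem.List.pyGetD acc (-1) 0 + (if String.mk [c] = x then 2 else 1)])
      [(0 : Int)] = (List.range (cs.length + 1)).map (pvP x cs) := by
  rw [← pvAList]
  have gen : ∀ (t : List Char) (acc : List Int) (h : acc ≠ []) (a0 : Int),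
      acc.getLast h = a0 →
      t.foldl (fun acc c =>
          acc ++ [PySem.List.pyGetD acc (-1) 0 + (if String.mk [c] = x then 2 else 1)]) acc =
        acc ++ pvScanA x a0 t := by
    intro t
    induction t with
    | nil => intro acc h a0 _; simp [pvScanA]
    | cons c t ih =>
      intro acc h a0 hlast
      simp only [List.foldl_cons]
      rw [PySem.List.pyGetD_neg_one acc 0 h, hlast]
      rw [ih (acc ++ [a0 + (if String.mk [c] = x then 2 else 1)]) (by simp)
            (a0 + (if String.mk [c] = x then 2 else 1)) (by simp)]
      simp [pvScanA]
  rw [gen cs [(0 : Int)] (by simp) 0 (by simp)]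
  rfl

-- the two ports as folds of pure functions
theorem A_eq (s x : String) :
    try_with_char s x =
      ((List.range s.toList.length).map
          (fun i => pvP x s.toList i + pvS x s.toList (pvNxt ((pvRDict.get? x).getD "") s.toList i))).foldl
        min (pvP x s.toList s.toList.length) := by
  simp only [try_with_char]
  rw [pvSolveSide_false, pvSolveSide_true, pvCalcNext_eq]
  have hans0 : PySem.List.pyGetD ((List.range (s.toList.length + 1)).map (pvP x s.toList))
      ((s.toList.length : Nat) : Int) 0 = pvP x s.toList s.toList.length := by
    rw [PySem.List.pyGetD_natCast, PySem.List.getD_map_range _ _ _ _ (by omega)]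
  rw [hans0]
  have hzip : ((List.range (s.toList.length + 1)).map (pvP x s.toList)).zip
      ((List.range s.toList.length).map
        (fun k => (pvNxt ((pvRDict.get? x).getD "") s.toList k : Int))) =
      (List.range s.toList.length).map
        (fun k => (pvP x s.toList k, (pvNxt ((pvRDict.get? x).getD "") s.toList k : Int))) := by
    apply List.ext_getElem
    · simp
    · intro i h1 h2
      simp [List.getElem_zip, List.getElem_map, List.getElem_range]
  rw [hzip, List.foldl_map, List.foldl_map]
  apply PySem.List.foldl_congr_mem
  intro acc k hk
  rw [List.mem_range] at hk
  have hnk : pvNxt ((pvRDict.get? x).getD "") s.toList k ≤ s.toList.length :=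
    pvNxt_le _ _ (le_of_lt hk)
  have hcast : ((s.toList.length : Nat) : Int) - (pvNxt ((pvRDict.get? x).getD "") s.toList k : Int)
      = ((s.toList.length - pvNxt ((pvRDict.get? x).getD "") s.toList k : Nat) : Int) := by
    omega
  rw [hcast, PySem.List.pyGetD_natCast, PySem.List.getD_map_range _ _ _ _ (by omega),
    Nat.sub_sub_self hnk]

theorem pvBfold (x y : String) (cs : List Char) : ∀ (t : List Char) (k : Nat) (ans : Int),
    cs.drop k = t → k ≤ cs.length →
    (PySem.List.enumerate t ((k : Nat) : Int)).foldl
      (fun (st : Int × Int) jc =>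
        if String.mk [jc.2] = y then
          (min st.1 (PySem.List.pyGetD ((List.range (cs.length + 1)).map (pvP x cs)) st.2 0 +
            (pvP x cs cs.length -
              PySem.List.pyGetD ((List.range (cs.length + 1)).map (pvP x cs)) jc.1 0)),
           jc.1 + 1)
        else st)
      (ans, (pvLS y cs k : Int)) =
    ((((List.range' k (cs.length - k)).filter (fun j => pvOpp y (cs.getD j ' '))).map
        (fun j => pvP x cs (pvLS y cs j) + pvS x cs j)).foldl min ans,
     (pvLS y cs cs.length : Int)) := by
  intro t
  induction t with
  | nil =>
    intro k ans hdrop hk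
    have hk' : k = cs.length := by
      have := List.drop_eq_nil_iff.mp hdrop
      omega
    subst hk'
    simp [PySem.List.enumerate]
  | cons c t' ih =>
    intro k ans hdrop hk
    have hlen : (cs.drop k).length = cs.length - k := List.length_drop
    have hklt : k < cs.length := by
      rw [hdrop] at hlen
      simp at hlen
      omega
    have hgetk : cs.getD k ' ' = c := by
      have h0 : (cs.drop k)[0]'(by rw [hdrop]; simp) = c := by
        simp [hdrop]
      rw [List.getElem_drop] at h0
      rw [List.getD_eq_getElem cs ' ' (by omega)]
      simpa using h0
    have hdrop' : cs.drop (k + 1) = t' := by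
      have : List.drop 1 (List.drop k cs) = List.drop (k + 1) cs := List.drop_drop
      rw [← this, hdrop]
      rfl
    rw [PySem.List.enumerate_cons, List.foldl_cons]
    have hrange : List.range' k (cs.length - k) =
        k :: List.range' (k + 1) (cs.length - (k + 1)) := by
      rw [show cs.length - k = (cs.length - (k + 1)) + 1 from by omega, List.range'_succ]
    by_cases hc : String.mk [c] = y
    · have hopp : pvOpp y (cs.getD k ' ') = true := by
        rw [hgetk]; unfold pvOpp; rw [hc]; simp
      rw [if_pos hc]
      have hls1 : pvLS y cs (k + 1) = k + 1 := by
        have hdef : pvLS y cs (k + 1) =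
            if pvOpp y (cs.getD k ' ') then k + 1 else pvLS y cs k := rfl
        rw [hdef, if_pos hopp]
      have hgls : PySem.List.pyGetD ((List.range (cs.length + 1)).map (pvP x cs))
          ((pvLS y cs k : Nat) : Int) 0 = pvP x cs (pvLS y cs k) := by
        rw [PySem.List.pyGetD_natCast,
          PySem.List.getD_map_range _ _ _ _ (by have := pvLS_le y cs k; omega)]
      have hgk : PySem.List.pyGetD ((List.range (cs.length + 1)).map (pvP x cs))
          ((k : Nat) : Int) 0 = pvP x cs k := by
        rw [PySem.List.pyGetD_natCast, PySem.List.getD_map_range _ _ _ _ (by omega)]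
      dsimp only
      rw [hgls, hgk]
      have hsub : pvP x cs cs.length - pvP x cs k = pvS x cs k := by
        have := pvP_add_pvS x cs k
        omega
      rw [hsub]
      have hih := ih (k + 1) (min ans (pvP x cs (pvLS y cs k) + pvS x cs k)) hdrop' (by omega)
      rw [hls1] at hih
      push_cast at hih ⊢
      rw [hrange, List.filter_cons_of_pos (p := fun j => pvOpp y (cs.getD j ' ')) hopp,
        List.map_cons, List.foldl_cons]
      exact hih
    · have hopp : pvOpp y (cs.getD k ' ') = false := by
        rw [hgetk]; unfold pvOpp; simp [hc]
      rw [if_neg hc]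
      have hls1 : pvLS y cs (k + 1) = pvLS y cs k := by
        have hdef : pvLS y cs (k + 1) =
            if pvOpp y (cs.getD k ' ') then k + 1 else pvLS y cs k := rfl
        rw [hdef, if_neg (by simpa using hopp)]
      have hih := ih (k + 1) ans hdrop' (by omega)
      rw [hls1] at hih
      push_cast at hih ⊢
      rw [hrange,
        List.filter_cons_of_neg (p := fun j => pvOpp y (cs.getD j ' ')) (by simpa using hopp)]
      exact hih

theorem B_eq (s x : String) :
    try_with_char_alt s x =
      min
        ((((List.range' 0 s.toList.length).filter
              (fun j => pvOpp ((pvRDict.get? x).getD "") (s.toList.getD j ' '))).map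
            (fun j => pvP x s.toList (pvLS ((pvRDict.get? x).getD "") s.toList j) + pvS x s.toList j)).foldl
          min (pvP x s.toList s.toList.length))
        (pvP x s.toList (pvLS ((pvRDict.get? x).getD "") s.toList s.toList.length)) := by
  simp only [try_with_char_alt]
  rw [pvBList]
  have htot : PySem.List.pyGetD ((List.range (s.toList.length + 1)).map (pvP x s.toList))
      ((s.toList.length : Nat) : Int) 0 = pvP x s.toList s.toList.length := by
    rw [PySem.List.pyGetD_natCast, PySem.List.getD_map_range _ _ _ _ (by omega)]
  rw [htot]
  have hfold := pvBfold x ((pvRDict.get? x).getD "") s.toList s.toList 0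
    (pvP x s.toList s.toList.length) rfl (Nat.zero_le _)
  rw [show (pvLS ((pvRDict.get? x).getD "") s.toList 0 : Int) = ((0 : Nat) : Int) from rfl] at hfold
  simp only [Nat.cast_zero] at hfold
  rw [hfold]
  have hls : pvLS ((pvRDict.get? x).getD "") s.toList s.toList.length ≤ s.toList.length :=
    pvLS_le _ _ _
  rw [PySem.List.pyGetD_natCast, PySem.List.getD_map_range _ _ _ _ (by omega)]
  rw [Nat.sub_zero]

theorem main_eq (cs : List Char) (x y : String) :
    ((List.range cs.length).map (fun i => pvP x cs i + pvS x cs (pvNxt y cs i))).foldl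
        min (pvP x cs cs.length) =
      min
        ((((List.range' 0 cs.length).filter (fun j => pvOpp y (cs.getD j ' '))).map
            (fun j => pvP x cs (pvLS y cs j) + pvS x cs j)).foldl
          min (pvP x cs cs.length))
        (pvP x cs (pvLS y cs cs.length)) := by
  apply le_antisymm
  · apply le_min
    · apply le_fmin (fmin_le_init _ _)
      intro b hb
      rw [List.mem_map] at hb
      obtain ⟨j, hj, rfl⟩ := hb
      rw [List.mem_filter] at hj
      obtain ⟨hjr, hjopp⟩ := hj
      rw [List.mem_range'_1] at hjr
      have hjn : j < cs.length := by omega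
      have hnxt : pvNxt y cs (pvLS y cs j) = j :=
        pvNxt_eq_of y cs (pvLS_le y cs j) (le_of_lt hjn)
          (fun m hm1 hm2 => pvLS_no_opp y cs hm1 hm2) (Or.inr hjopp)
      have hmem : pvP x cs (pvLS y cs j) + pvS x cs j ∈
          (List.range cs.length).map (fun i => pvP x cs i + pvS x cs (pvNxt y cs i)) := by
        apply List.mem_map.mpr
        exact ⟨pvLS y cs j, List.mem_range.mpr (by have := pvLS_le y cs j; omega), by rw [hnxt]⟩
      exact fmin_le_mem _ hmem
    · have hnxt : pvNxt y cs (pvLS y cs cs.length) = cs.length :=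
        pvNxt_eq_of y cs (pvLS_le y cs _) (le_refl _)
          (fun m hm1 hm2 => pvLS_no_opp y cs hm1 hm2) (Or.inl rfl)
      rcases Nat.lt_or_ge (pvLS y cs cs.length) cs.length with hlt | hge
      · have hmem : pvP x cs (pvLS y cs cs.length) + pvS x cs cs.length ∈
            (List.range cs.length).map (fun i => pvP x cs i + pvS x cs (pvNxt y cs i)) := by
          apply List.mem_map.mpr
          exact ⟨pvLS y cs cs.length, List.mem_range.mpr hlt, by rw [hnxt]⟩
        have h := fmin_le_mem (pvP x cs cs.length) hmem
        rw [pvS_length] at h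
        simpa using h
      · have heq : pvLS y cs cs.length = cs.length := le_antisymm (pvLS_le _ _ _) hge
        rw [heq]
        exact fmin_le_init _ _
  · apply le_fmin (le_trans (min_le_left _ _) (fmin_le_init _ _))
    intro b hb
    rw [List.mem_map] at hb
    obtain ⟨i, hi, rfl⟩ := hb
    rw [List.mem_range] at hi
    rcases Nat.lt_or_ge (pvNxt y cs i) cs.length with hjlt | hjge
    · have hopp := pvNxt_opp y cs hjlt
      have hlsle : pvLS y cs (pvNxt y cs i) ≤ i := by
        apply pvLS_le_of
        intro m hm hmopp
        by_contra hcon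
        push_neg at hcon
        have h := pvNxt_not_opp y cs hcon hm (by omega)
        rw [hmopp] at h
        simp at h
      have hmem : pvP x cs (pvLS y cs (pvNxt y cs i)) + pvS x cs (pvNxt y cs i) ∈
          (((List.range' 0 cs.length).filter (fun j => pvOpp y (cs.getD j ' '))).map
            (fun j => pvP x cs (pvLS y cs j) + pvS x cs j)) := by
        apply List.mem_map.mpr
        refine ⟨pvNxt y cs i, ?_, rfl⟩
        rw [List.mem_filter, List.mem_range'_1]
        exact ⟨⟨Nat.zero_le _, by omega⟩, hopp⟩
      calc
        min ((((List.range' 0 cs.length).filter (fun j => pvOpp y (cs.getD j ' '))).map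
              (fun j => pvP x cs (pvLS y cs j) + pvS x cs j)).foldl min (pvP x cs cs.length))
            (pvP x cs (pvLS y cs cs.length)) ≤
            (((List.range' 0 cs.length).filter (fun j => pvOpp y (cs.getD j ' '))).map
              (fun j => pvP x cs (pvLS y cs j) + pvS x cs j)).foldl min (pvP x cs cs.length) :=
          min_le_left _ _
        _ ≤ pvP x cs (pvLS y cs (pvNxt y cs i)) + pvS x cs (pvNxt y cs i) := fmin_le_mem _ hmem
        _ ≤ pvP x cs i + pvS x cs (pvNxt y cs i) := by have := pvP_mono x cs hlsle; omega
    · have hjeq : pvNxt y cs i = cs.length := le_antisymm (pvNxt_le y cs (le_of_lt hi)) hjge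
      have hlsle : pvLS y cs cs.length ≤ i := by
        apply pvLS_le_of
        intro m hm hmopp
        by_contra hcon
        push_neg at hcon
        have h := pvNxt_not_opp y cs hcon (by omega) hm
        rw [hmopp] at h
        simp at h
      rw [hjeq, pvS_length]
      calc
        min ((((List.range' 0 cs.length).filter (fun j => pvOpp y (cs.getD j ' '))).map
              (fun j => pvP x cs (pvLS y cs j) + pvS x cs j)).foldl min (pvP x cs cs.length))
            (pvP x cs (pvLS y cs cs.length)) ≤ pvP x cs (pvLS y cs cs.length) := min_le_right _ _
        _ ≤ pvP x cs i := pvP_mono x cs hlsle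
        _ ≤ pvP x cs i + 0 := by omega

-- ===== VERDICT (by name: the statement is the Claim_ definition above) =====
theorem try_with_char_spec : Claim_equal_try_with_char := by
  intro s x _ _
  unfold Spec_try_with_char
  rw [A_eq, B_eq, main_eq]
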